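-- pv_equiv track=rewrite | github.com/timng0/cs141-w25 | lec18.py | strings_lengths
-- ===== SOURCE A (Python) =====
-- def strings_lengths(strings):
--     if strings == []:
--         return 0
--     else:
--         first, *rest = strings
--         return len(first) + strings_lengths(rest)
--
--     # iterative version that won't run because it comes after returns
--     total = 0
--     for string in strings:
--         total = total + len(string)
--     return total
-- ===== SOURCE B (Python) =====
-- def strings_lengths(strings):
--     total = 0
--     for string in strings:
--         total = total + len(string)
--     return total
-- ===== Notes on version B (the rewrite author's own statement) =====
-- stated objective: simpler
-- what changed: Replaced the recursive head/rest decomposition (one recursive call and list re-splitting per element) with a single flat accumulator loop over the list.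
import Mathlib
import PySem

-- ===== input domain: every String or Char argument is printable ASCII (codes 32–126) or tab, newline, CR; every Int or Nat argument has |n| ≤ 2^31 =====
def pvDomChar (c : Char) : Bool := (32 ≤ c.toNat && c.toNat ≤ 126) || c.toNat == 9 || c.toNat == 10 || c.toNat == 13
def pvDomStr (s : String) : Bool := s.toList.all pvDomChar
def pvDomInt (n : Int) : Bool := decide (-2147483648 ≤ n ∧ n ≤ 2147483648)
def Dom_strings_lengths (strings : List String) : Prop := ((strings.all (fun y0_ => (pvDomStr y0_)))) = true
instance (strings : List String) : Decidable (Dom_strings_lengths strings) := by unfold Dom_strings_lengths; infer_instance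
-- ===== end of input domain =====

-- B replaces A's per-element recursion (with tail-copying unpacking) by a single accumulator loop; same sum of lengths.
-- ===== PORT A =====
-- literal port of A's recursion: empty → 0, else len(first) + recurse on rest
def strings_lengths (strings : List String) : Int :=
  if strings = [] then 0
  else
    match strings with
    | [] => 0
    | first :: rest => (PySem.Str.len first) + strings_lengths rest

-- ===== PORT B =====
-- B: iterative accumulator loop, ported as a foldl over the same list
def strings_lengths_alt (strings : List String) : Int :=
  strings.foldl (fun total string => total + PySem.Str.len string) 0

-- ===== PRECONDITION & SPEC =====
def Spec_strings_lengths (strings : List String) (out : Int) : Prop := out = strings_lengths_alt strings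
instance (strings : List String) (out : Int) : Decidable (Spec_strings_lengths strings out) := by unfold Spec_strings_lengths; infer_instance

-- ===== CLAIM (what is proved, stated in full; the proofs are below) =====
def Claim_equal_strings_lengths : Prop := ∀ (strings : List String), Dom_strings_lengths strings → Spec_strings_lengths strings (strings_lengths strings)

-- ===== LEMMAS AND PROOFS =====

-- ===== VERDICT (by name: the statement is the Claim_ definition above) =====
theorem foldl_len_acc (xs : List String) (acc : Int) :
    xs.foldl (fun total string => total + PySem.Str.len string) acc
      = acc + strings_lengths xs := by
  induction xs generalizing acc with
  | nil => simp [strings_lengths]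
  | cons x xs ih =>
    rw [List.foldl_cons, ih]
    simp [strings_lengths]
    ring

theorem strings_lengths_spec : Claim_equal_strings_lengths := by
  intro strings _
  unfold Spec_strings_lengths strings_lengths_alt
  rw [foldl_len_acc]
  ring
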